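-- pv_equiv track=rewrite | github.com/confusables/the-kitten-study-2 | study-2-extension/analyze_5axis.py | axis_disagreement_table
-- ===== SOURCE A (Python) =====
-- AXES = [
--     "axis_1_lede_frame",
--     "axis_2_keep_section_function",
--     "axis_3_self_assessment_scaffolding",
--     "axis_4_operationalization",
--     "axis_5_closing_structure",
-- ]
--
-- AXIS_LABELS = ["A1 (lede)", "A2 (keep-fn)", "A3 (self-assess)", "A4 (op-sym)", "A5 (closing)"]
--
-- def axis_disagreement_table(
--     judges: list[str], data: dict[str, dict[str, dict]],
-- ) -> list[tuple[str, int, int, int]]: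
--     """For pairwise judges (first two), compute per-axis delta distribution.
--
--     Returns rows of (axis_label, n_delta_0, n_delta_1, n_delta_2).
--     """
--     if len(judges) < 2:
--         return []
--     j1, j2 = judges[0], judges[1]
--     common = sorted(set(data[j1].keys()) & set(data[j2].keys()))
--     rows = []
--     for ai, axis in enumerate(AXES):
--         d0 = d1 = d2 = 0
--         for run in common:
--             delta = abs(data[j1][run][axis] - data[j2][run][axis])
--             if delta == 0:
--                 d0 += 1
--             elif delta == 1:
--                 d1 += 1
--             elif delta == 2:
--                 d2 += 1
--         rows.append((AXIS_LABELS[ai], d0, d1, d2))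
--     return rows
-- ===== SOURCE B (Python) =====
-- AXES = [
--     "axis_1_lede_frame",
--     "axis_2_keep_section_function",
--     "axis_3_self_assessment_scaffolding",
--     "axis_4_operationalization",
--     "axis_5_closing_structure",
-- ]
--
-- AXIS_LABELS = ["A1 (lede)", "A2 (keep-fn)", "A3 (self-assess)", "A4 (op-sym)", "A5 (closing)"]
--
--
-- def axis_disagreement_table(
--     judges: list[str], data: dict[str, dict[str, dict]],
-- ) -> list[tuple[str, int, int, int]]:
--     """Run-major single sweep: one histogram dict keyed by (axis index, delta)."""
--     if len(judges) < 2: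
--         return []
--     j1, j2 = judges[0], judges[1]
--     common = sorted(set(data[j1].keys()) & set(data[j2].keys()))
--     counts = {}
--     for run in common:
--         r1, r2 = data[j1][run], data[j2][run]
--         for ai, axis in enumerate(AXES):
--             key = (ai, abs(r1[axis] - r2[axis]))
--             counts[key] = counts.get(key, 0) + 1
--     return [
--         (label, counts.get((ai, 0), 0), counts.get((ai, 1), 0), counts.get((ai, 2), 0))
--         for ai, label in enumerate(AXIS_LABELS)
--     ]
-- ===== Notes on version B (the rewrite author's own statement) =====
-- stated objective: alternative
-- what changed: A makes an axis-major sweep keeping three scalar counters per axis via an if/elif chain; B makes one run-major pass over the common runs accumulating a single histogram dict keyed by (axis index, delta) and reads the 15 cells back at the end.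
import Mathlib
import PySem

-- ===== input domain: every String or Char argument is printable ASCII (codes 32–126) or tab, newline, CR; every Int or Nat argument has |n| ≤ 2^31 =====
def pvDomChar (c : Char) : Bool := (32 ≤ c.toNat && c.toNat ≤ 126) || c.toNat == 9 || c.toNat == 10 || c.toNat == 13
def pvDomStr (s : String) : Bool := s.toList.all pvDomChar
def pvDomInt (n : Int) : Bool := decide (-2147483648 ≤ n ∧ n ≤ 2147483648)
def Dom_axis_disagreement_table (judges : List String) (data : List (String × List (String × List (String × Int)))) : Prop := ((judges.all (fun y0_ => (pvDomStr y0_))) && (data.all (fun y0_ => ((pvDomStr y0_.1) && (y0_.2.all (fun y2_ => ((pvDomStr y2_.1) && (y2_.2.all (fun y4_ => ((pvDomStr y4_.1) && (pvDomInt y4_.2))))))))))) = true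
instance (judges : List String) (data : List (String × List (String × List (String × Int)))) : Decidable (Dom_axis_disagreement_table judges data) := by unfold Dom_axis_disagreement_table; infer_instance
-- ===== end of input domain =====

-- B restructures A's axis-major triple-counter sweep into a single run-major pass that
-- accumulates one histogram dict keyed by (axis index, delta); alternative decomposition, same cost.


-- module constants shared by both Pythons
def pvAxes : List String := [
  "axis_1_lede_frame",
  "axis_2_keep_section_function",
  "axis_3_self_assessment_scaffolding",
  "axis_4_operationalization",
  "axis_5_closing_structure"]

def pvAxisLabels : List String := ["A1 (lede)", "A2 (keep-fn)", "A3 (self-assess)", "A4 (op-sym)", "A5 (closing)"]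

-- ===== PORT A =====
-- axis-major: for each axis, three scalar counters updated by an if/elif chain over common runs
def axis_disagreement_table (judges : List String) (data : List (String × List (String × List (String × Int)))) : List (String × Int × Int × Int) :=
  if judges.length < 2 then []
  else
    let j1 := PySem.List.pyGetD judges 0 ""
    let j2 := PySem.List.pyGetD judges 1 ""
    let dj1 := (List.lookup j1 data).getD []
    let dj2 := (List.lookup j2 data).getD []
    let common := PySem.List.sorted
      (PySem.Set.inter (PySem.Set.ofList (dj1.map Prod.fst)) (PySem.Set.ofList (dj2.map Prod.fst)))
      (fun x => x) false
    (PySem.List.enumerate pvAxes 0).foldl (fun rows p =>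
      let c := common.foldl (fun (s : Int × Int × Int) run =>
        let delta := |((List.lookup p.2 ((List.lookup run dj1).getD [])).getD 0)
                      - ((List.lookup p.2 ((List.lookup run dj2).getD [])).getD 0)|
        if delta = 0 then (s.1 + 1, s.2.1, s.2.2)
        else if delta = 1 then (s.1, s.2.1 + 1, s.2.2)
        else if delta = 2 then (s.1, s.2.1, s.2.2 + 1)
        else s) (0, 0, 0)
      rows ++ [(PySem.List.pyGetD pvAxisLabels p.1 "", c.1, c.2.1, c.2.2)]) []

-- ===== PORT B =====
-- run-major: one pass over common runs filling a dict keyed by (axis index, delta), read back at the end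
def axis_disagreement_table_alt (judges : List String) (data : List (String × List (String × List (String × Int)))) : List (String × Int × Int × Int) :=
  if judges.length < 2 then []
  else
    let j1 := PySem.List.pyGetD judges 0 ""
    let j2 := PySem.List.pyGetD judges 1 ""
    let dj1 := (List.lookup j1 data).getD []
    let dj2 := (List.lookup j2 data).getD []
    let common := PySem.List.sorted
      (PySem.Set.inter (PySem.Set.ofList (dj1.map Prod.fst)) (PySem.Set.ofList (dj2.map Prod.fst)))
      (fun x => x) false
    let counts := common.foldl (fun (d : PySem.Dict (Int × Int) Int) run =>
      let r1 := (List.lookup run dj1).getD []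
      let r2 := (List.lookup run dj2).getD []
      (PySem.List.enumerate pvAxes 0).foldl (fun d p =>
        let key := (p.1, |((List.lookup p.2 r1).getD 0) - ((List.lookup p.2 r2).getD 0)|)
        d.insert key (d.getD key 0 + 1)) d) PySem.Dict.empty
    (PySem.List.enumerate pvAxisLabels 0).map (fun p =>
      (p.2, counts.getD (p.1, 0) 0, counts.getD (p.1, 1) 0, counts.getD (p.1, 2) 0))

-- ===== PRECONDITION & SPEC =====
-- Pre_ excludes exactly the KeyError inputs: with ≥ 2 judges, the first two judges must be keys of
-- data, and every run key common to both their run dicts must carry all five axis keys on both sides.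
def Pre_axis_disagreement_table (judges : List String) (data : List (String × List (String × List (String × Int)))) : Prop :=
  2 ≤ judges.length →
    ((List.lookup (PySem.List.pyGetD judges 0 "") data).isSome = true ∧
     (List.lookup (PySem.List.pyGetD judges 1 "") data).isSome = true ∧
     ∀ run : String,
       run ∈ ((List.lookup (PySem.List.pyGetD judges 0 "") data).getD []).map Prod.fst →
       run ∈ ((List.lookup (PySem.List.pyGetD judges 1 "") data).getD []).map Prod.fst →
       ∀ axis ∈ pvAxes,
         (List.lookup axis ((List.lookup run ((List.lookup (PySem.List.pyGetD judges 0 "") data).getD [])).getD [])).isSome = true ∧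
         (List.lookup axis ((List.lookup run ((List.lookup (PySem.List.pyGetD judges 1 "") data).getD [])).getD [])).isSome = true)
instance (judges : List String) (data : List (String × List (String × List (String × Int)))) : Decidable (Pre_axis_disagreement_table judges data) := by
  unfold Pre_axis_disagreement_table
  have : DecidablePred (fun s : String => s ∈ pvAxes) := fun _ => by infer_instance
  infer_instance

def pvWitness_axis_disagreement_table : List String × (List (String × List (String × List (String × Int)))) :=
  (["alice", "bob"],
   [("alice", [("r1", [("axis_1_lede_frame", 1), ("axis_2_keep_section_function", 2),
                       ("axis_3_self_assessment_scaffolding", 3), ("axis_4_operationalization", 1),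
                       ("axis_5_closing_structure", 0)])]),
    ("bob", [("r1", [("axis_1_lede_frame", 2), ("axis_2_keep_section_function", 2),
                     ("axis_3_self_assessment_scaffolding", 1), ("axis_4_operationalization", 1),
                     ("axis_5_closing_structure", 2)])])])

def Spec_axis_disagreement_table (judges : List String) (data : List (String × List (String × List (String × Int)))) (out : List (String × Int × Int × Int)) : Prop := out = axis_disagreement_table_alt judges data
instance (judges : List String) (data : List (String × List (String × List (String × Int)))) (out : List (String × Int × Int × Int)) : Decidable (Spec_axis_disagreement_table judges data out) := by unfold Spec_axis_disagreement_table; infer_instance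

-- ===== CLAIM (what is proved, stated in full; the proofs are below) =====
def Claim_equal_axis_disagreement_table : Prop := ∀ (judges : List String) (data : List (String × List (String × List (String × Int)))), Dom_axis_disagreement_table judges data → Pre_axis_disagreement_table judges data → Spec_axis_disagreement_table judges data (axis_disagreement_table judges data)

-- ===== LEMMAS AND PROOFS =====

-- A's inner loop: the triple of counters is a triple of countP's
theorem pvTripleFold (l : List String) (f : String → Int) (a b c : Int) :
    l.foldl (fun (s : Int × Int × Int) run =>
      if f run = 0 then (s.1 + 1, s.2.1, s.2.2)
      else if f run = 1 then (s.1, s.2.1 + 1, s.2.2)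
      else if f run = 2 then (s.1, s.2.1, s.2.2 + 1)
      else s) (a, b, c)
    = (a + (l.map (fun r => if f r = 0 then (1 : Int) else 0)).sum,
       b + (l.map (fun r => if f r = 1 then (1 : Int) else 0)).sum,
       c + (l.map (fun r => if f r = 2 then (1 : Int) else 0)).sum) := by
  induction l generalizing a b c with
  | nil => simp
  | cons hd tl ih =>
    simp only [List.foldl_cons, List.map_cons, List.sum_cons]
    split_ifs with h0 h1 h2 <;> rw [ih] <;> simp [Prod.ext_iff] <;> first | ring | omega

-- proof-side abbreviations
def pvDelta (r1 r2 : List (String × Int)) (axis : String) : Int :=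
  |((List.lookup axis r1).getD 0) - ((List.lookup axis r2).getD 0)|

def pvKeys (r1 r2 : List (String × Int)) : List (Int × Int) :=
  (PySem.List.enumerate pvAxes 0).map (fun p => (p.1, pvDelta r1 r2 p.2))

-- B's inner loop (the five inserts of one run), seen through getD
theorem pvInnerGetD (r1 r2 : List (String × Int)) (d : PySem.Dict (Int × Int) Int) (q : Int × Int) :
    ((PySem.List.enumerate pvAxes 0).foldl (fun d p =>
        let key := (p.1, |((List.lookup p.2 r1).getD 0) - ((List.lookup p.2 r2).getD 0)|)
        d.insert key (d.getD key 0 + 1)) d).getD q 0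
    = d.getD q 0 + ((pvKeys r1 r2).count q : Int) := by
  have h : ((PySem.List.enumerate pvAxes 0).foldl (fun d p =>
        let key := (p.1, |((List.lookup p.2 r1).getD 0) - ((List.lookup p.2 r2).getD 0)|)
        d.insert key (d.getD key 0 + 1)) d)
      = ((pvKeys r1 r2).foldl (fun d k => d.modify k 0 (· + 1)) d) := by
    rw [pvKeys, List.foldl_map]; rfl
  rw [h, PySem.Dict.getD_foldl_modify_add_one]

-- B's outer loop, seen through getD
theorem pvOuterGetD (dj1 dj2 : List (String × List (String × Int))) (q : Int × Int) :
    ∀ (l : List String) (d : PySem.Dict (Int × Int) Int),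
    (l.foldl (fun (d : PySem.Dict (Int × Int) Int) run =>
        let r1 := (List.lookup run dj1).getD []
        let r2 := (List.lookup run dj2).getD []
        (PySem.List.enumerate pvAxes 0).foldl (fun d p =>
          let key := (p.1, |((List.lookup p.2 r1).getD 0) - ((List.lookup p.2 r2).getD 0)|)
          d.insert key (d.getD key 0 + 1)) d) d).getD q 0
    = d.getD q 0 + (l.map (fun run => ((pvKeys ((List.lookup run dj1).getD []) ((List.lookup run dj2).getD [])).count q : Int))).sum := by
  intro l
  induction l with
  | nil => simp
  | cons hd tl ih =>
    intro d
    simp only [List.foldl_cons, List.map_cons, List.sum_cons, ih, pvInnerGetD]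
    ring

theorem axis_disagreement_table_spec : Claim_equal_axis_disagreement_table := by
  intro judges data _ _
  unfold Spec_axis_disagreement_table axis_disagreement_table axis_disagreement_table_alt
  by_cases hlen : judges.length < 2
  · simp [hlen]
  · simp only [if_neg hlen]
    simp only [pvOuterGetD, PySem.Dict.getD_empty]
    simp only [pvTripleFold]
    simp only [pvAxisLabels, pvAxes, PySem.List.enumerate_cons, PySem.List.enumerate_nil,
      List.foldl_cons, List.foldl_nil, List.map_cons, List.map_nil]
    simp only [pvKeys, pvDelta, pvAxes, PySem.List.enumerate_cons, PySem.List.enumerate_nil,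
      List.map_cons, List.map_nil, List.count_cons, List.count_nil]
    norm_num [List.count_cons, Prod.ext_iff]
    decide
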